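-- pv_equiv track=rewrite | github.com/daggbt/industrial-workforce-scheduler | utils/helpers.py | get_shifts
-- ===== SOURCE A (Python) =====
-- from typing import List
--
-- def get_shifts(schedule: List[int]) -> List[List[int]]:
--     """Group consecutive hours into shifts"""
--     if not schedule:
--         return []
--
--     shifts = []
--     current_shift = [schedule[0]]
--
--     for hour in schedule[1:]:
--         if hour == current_shift[-1] + 1:
--             current_shift.append(hour)
--         else:
--             shifts.append(current_shift)
--             current_shift = [hour]
--
--     if current_shift:
--         shifts.append(current_shift)
--     return shifts
-- ===== SOURCE B (Python) =====
-- def get_shifts(schedule):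
--     """Group consecutive hours into shifts: two-pointer run splitting.
--
--     An outer loop advances a start pointer i run by run; an inner loop moves
--     j to the end of the consecutive run starting at i; the shift is the
--     slice schedule[i:j]. No growing accumulator list is maintained.
--     """
--     shifts = []
--     i = 0
--     n = len(schedule)
--     while i < n:
--         j = i + 1
--         while j < n and schedule[j] == schedule[j - 1] + 1:
--             j += 1
--         shifts.append(schedule[i:j])
--         i = j
--     return shifts
-- ===== Notes on version B (the rewrite author's own statement) =====
-- stated objective: alternative
-- what changed: B is a two-pointer run splitter: an outer loop per run and an inner loop that advances an end index to the run boundary, emitting each shift as a slice schedule[i:j], instead of A's single element-by-element pass that grows a current-shift accumulator and flushes it at breaks.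
import Mathlib
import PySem

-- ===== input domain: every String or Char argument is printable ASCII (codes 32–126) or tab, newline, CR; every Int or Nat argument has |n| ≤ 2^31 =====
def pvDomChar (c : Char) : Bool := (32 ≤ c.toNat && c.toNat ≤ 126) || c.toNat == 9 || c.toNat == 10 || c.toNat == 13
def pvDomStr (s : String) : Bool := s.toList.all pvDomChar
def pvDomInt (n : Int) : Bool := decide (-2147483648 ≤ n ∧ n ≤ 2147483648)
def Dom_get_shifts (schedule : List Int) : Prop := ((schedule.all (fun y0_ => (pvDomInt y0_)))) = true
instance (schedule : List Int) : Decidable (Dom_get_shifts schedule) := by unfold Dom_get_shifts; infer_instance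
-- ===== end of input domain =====

-- B replaces A's element-by-element pass (growing current-shift accumulator, flushed at
-- breaks) by a two-pointer run splitter: an inner loop finds each run's end index and the
-- shift is emitted as a slice; same cost (objective: alternative).

-- ===== PORT A =====
-- one step of A's loop body: state = (shifts, current_shift)
def get_shifts_stepA (st : List (List Int) × List Int) (hour : Int) : List (List Int) × List Int :=
  -- `current_shift[-1]` : current_shift is always nonempty here, so getLast? = pyGet? at -1
  if st.2.getLast?.map (· + 1) = some hour then (st.1, st.2 ++ [hour])
  else (st.1 ++ [st.2], [hour])

def get_shifts (schedule : List Int) : List (List Int) :=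
  match schedule with
  | [] => []
  | x :: rest =>
    let st := rest.foldl get_shifts_stepA ([], [x])
    if st.2 ≠ [] then st.1 ++ [st.2] else st.1

-- ===== PORT B =====
-- inner `while j < n and schedule[j] == schedule[j-1] + 1: j += 1` loop of Source B;
-- j ≥ 1 throughout in Python, so j : Nat is exact (schedule[j], schedule[j-1] hit
-- nonnegative in-range indices only, via pyGet?)
def get_shifts_runEnd (schedule : List Int) (j : Nat) : Nat :=
  if h : j < schedule.length ∧
      PySem.List.pyGet? schedule (j : Int) =
        (PySem.List.pyGet? schedule ((j : Int) - 1)).map (· + 1) then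
    get_shifts_runEnd schedule (j + 1)
  else j
termination_by schedule.length - j
decreasing_by omega

-- j ≤ runEnd j: cited by the outer loop's decreasing_by
theorem le_get_shifts_runEnd (schedule : List Int) (j : Nat) :
    j ≤ get_shifts_runEnd schedule j := by
  unfold get_shifts_runEnd
  split
  · exact le_trans (Nat.le_succ j) (le_get_shifts_runEnd schedule (j + 1))
  · exact le_refl j
termination_by schedule.length - j
decreasing_by
  rename_i h; omega

-- outer `while i < n` loop of Source B; i : Nat (starts at 0, only increases)
def get_shifts_outer (schedule : List Int) (shifts : List (List Int)) (i : Nat) :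
    List (List Int) :=
  if _h : i < schedule.length then
    let j := get_shifts_runEnd schedule (i + 1)
    get_shifts_outer schedule
      (shifts ++ [PySem.List.slice schedule (some (i : Int)) (some (j : Int))]) j
  else shifts
termination_by schedule.length - i
decreasing_by
  have := le_get_shifts_runEnd schedule (i + 1); omega

def get_shifts_alt (schedule : List Int) : List (List Int) :=
  get_shifts_outer schedule [] 0

-- ===== PRECONDITION & SPEC =====
def Spec_get_shifts (schedule : List Int) (out : List (List Int)) : Prop := out = get_shifts_alt schedule
instance (schedule : List Int) (out : List (List Int)) : Decidable (Spec_get_shifts schedule out) := by unfold Spec_get_shifts; infer_instance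

-- ===== CLAIM (what is proved, stated in full; the proofs are below) =====
def Claim_equal_get_shifts : Prop := ∀ (schedule : List Int), Dom_get_shifts schedule → Spec_get_shifts schedule (get_shifts schedule)

-- ===== LEMMAS AND PROOFS =====

-- chain p t = number of leading elements of t continuing the run ending at p
def chainLen : Int → List Int → Nat
  | _, [] => 0
  | p, y :: t => if y = p + 1 then chainLen y t + 1 else 0

-- reference grouping: split off the leading run, recurse
def groupRuns : List Int → List (List Int)
  | [] => []
  | x :: rest =>
    (x :: rest.take (chainLen x rest)) :: groupRuns (rest.drop (chainLen x rest))
termination_by l => l.length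
decreasing_by simp

theorem groupRuns_nil : groupRuns [] = [] := by rw [groupRuns.eq_def]

theorem groupRuns_cons (x : Int) (rest : List Int) :
    groupRuns (x :: rest)
      = (x :: rest.take (chainLen x rest)) :: groupRuns (rest.drop (chainLen x rest)) := by
  rw [groupRuns.eq_def]

-- cons-side step: what one element does to the grouping of the tail
def stepC (hour : Int) (shifts : List (List Int)) : List (List Int) :=
  match shifts with
  | (y :: g) :: rest => if y = hour + 1 then (hour :: y :: g) :: rest else [hour] :: shifts
  | _ => [hour] :: shifts

-- ---- A-side: get_shifts = foldr stepC [] ----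

def fA : List Int → List Int → List (List Int)
  | cur, [] => [cur]
  | cur, h :: t =>
    if cur.getLast?.map (· + 1) = some h then fA (cur ++ [h]) t else cur :: fA [h] t

theorem foldlA_eq_fA (xs : List Int) : ∀ (shifts : List (List Int)) (cur : List Int), cur ≠ [] →
    (let st := xs.foldl get_shifts_stepA (shifts, cur);
     if st.2 ≠ [] then st.1 ++ [st.2] else st.1) = shifts ++ fA cur xs := by
  induction xs with
  | nil => intro shifts cur hc; simp [fA, hc]
  | cons h t ih =>
    intro shifts cur hc
    simp only [List.foldl_cons, fA, get_shifts_stepA]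
    by_cases hcond : cur.getLast?.map (· + 1) = some h
    · simp only [hcond, if_true]
      rw [ih shifts (cur ++ [h]) (by simp)]
    · simp only [if_neg hcond]
      rw [ih (shifts ++ [cur]) [h] (by simp)]
      simp

def mergeRun (cur : List Int) (l : List (List Int)) : List (List Int) :=
  match l with
  | (y :: g) :: rest => if cur.getLast?.map (· + 1) = some y then (cur ++ y :: g) :: rest else cur :: l
  | _ => cur :: l

theorem stepC_eq_mergeRun (h : Int) (l : List (List Int)) : stepC h l = mergeRun [h] l := by
  cases l with
  | nil => simp [stepC, mergeRun]
  | cons g rest =>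
    cases g with
    | nil => simp [stepC, mergeRun]
    | cons y g' =>
      simp only [stepC, mergeRun, List.getLast?_singleton, Option.map_some]
      by_cases hy : y = h + 1
      · simp [hy]
      · rw [if_neg hy, if_neg (by simpa [eq_comm] using hy)]

theorem fA_eq_mergeRun (xs : List Int) : ∀ (cur : List Int),
    fA cur xs = mergeRun cur (xs.foldr stepC []) := by
  induction xs with
  | nil => intro cur; rfl
  | cons h t ih =>
    intro cur
    simp only [fA, List.foldr_cons]
    set Bt := t.foldr stepC [] with hBt
    by_cases hc : cur.getLast?.map (· + 1) = some h
    · rw [if_pos hc, ih (cur ++ [h])]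
      cases Bt with
      | nil => simp [stepC, mergeRun, hc]
      | cons g rest =>
        cases g with
        | nil => simp [stepC, mergeRun, hc]
        | cons y g' =>
          by_cases hy : y = h + 1
          · simp [stepC, mergeRun, hy, hc]
          · simp only [stepC, if_neg hy, mergeRun, hc, if_true,
              List.getLast?_append, List.getLast?_singleton]
            rw [if_neg (by simpa [eq_comm] using hy)]
    · rw [if_neg hc, ih [h], ← stepC_eq_mergeRun]
      have hhead : ∃ g rest, stepC h Bt = (h :: g) :: rest := by
        cases Bt with
        | nil => exact ⟨[], [], rfl⟩
        | cons g rest =>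
          cases g with
          | nil => exact ⟨[], [] :: rest, rfl⟩
          | cons y g' =>
            by_cases hy : y = h + 1
            · exact ⟨y :: g', rest, by simp [stepC, hy]⟩
            · exact ⟨[], (y :: g') :: rest, by simp [stepC, hy]⟩
      obtain ⟨g, rest, hg⟩ := hhead
      rw [hg]
      simp [mergeRun, hc]

theorem getShifts_eq_foldr (schedule : List Int) :
    get_shifts schedule = schedule.foldr stepC [] := by
  cases schedule with
  | nil => rfl
  | cons x rest =>
    unfold get_shifts
    simp only []
    rw [foldlA_eq_fA rest [] [x] (by simp), fA_eq_mergeRun, ← stepC_eq_mergeRun]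
    simp

-- ---- foldr stepC [] = groupRuns ----

theorem stepC_groupRuns (x : Int) (rest : List Int) :
    stepC x (groupRuns rest) = groupRuns (x :: rest) := by
  cases rest with
  | nil => simp [groupRuns_nil, groupRuns_cons, stepC, chainLen]
  | cons y t =>
    by_cases hy : y = x + 1
    · rw [groupRuns_cons, groupRuns_cons]
      simp only [chainLen, hy, if_pos]
      simp [stepC, List.take_succ_cons, List.drop_succ_cons]
    · rw [groupRuns_cons x (y :: t)]
      simp only [chainLen, if_neg hy, List.take_zero, List.drop_zero]
      rw [groupRuns_cons y t]
      simp [stepC, hy]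

theorem foldr_stepC_eq_groupRuns (schedule : List Int) :
    schedule.foldr stepC [] = groupRuns schedule := by
  induction schedule with
  | nil => exact groupRuns_nil.symm
  | cons x rest ih => rw [List.foldr_cons, ih, stepC_groupRuns]

-- ---- B-side: get_shifts_alt = groupRuns ----

-- the inner loop lands at start-of-run + 1 + chain length
theorem runEnd_spec (p : Int) (t : List Int) : ∀ (pre : List Int),
    get_shifts_runEnd (pre ++ p :: t) (pre.length + 1)
      = pre.length + 1 + chainLen p t := by
  induction t generalizing p with
  | nil =>
    intro pre
    rw [get_shifts_runEnd]
    rw [dif_neg (by simp)]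
    simp [chainLen]
  | cons y t' ih =>
    intro pre
    have hlen : pre.length + 1 < (pre ++ p :: y :: t').length := by simp
    have hj : PySem.List.pyGet? (pre ++ p :: y :: t') ((pre.length + 1 : Nat) : Int)
        = some y := by
      rw [PySem.List.pyGet?_natCast]
      simp
    have hj1 : PySem.List.pyGet? (pre ++ p :: y :: t') (((pre.length + 1 : Nat) : Int) - 1)
        = some p := by
      have : ((pre.length + 1 : Nat) : Int) - 1 = ((pre.length : Nat) : Int) := by push_cast; ring
      rw [this, PySem.List.pyGet?_natCast]
      simp
    rw [get_shifts_runEnd]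
    by_cases hy : y = p + 1
    · rw [dif_pos ⟨hlen, by rw [hj, hj1]; simp [hy]⟩]
      have h3 : pre ++ p :: y :: t' = (pre ++ [p]) ++ y :: t' := by simp
      have h2 : pre.length + 1 + 1 = (pre ++ [p]).length + 1 := by simp
      rw [h3, h2, ih y (pre ++ [p])]
      simp [chainLen, hy]
      omega
    · rw [dif_neg]
      · simp [chainLen, hy]
      · intro hcon
        rw [hj, hj1] at hcon
        exact hy (by simpa using hcon.2)

theorem outer_eq_groupRuns (n : Nat) : ∀ (schedule : List Int) (shifts : List (List Int)) (i : Nat),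
    schedule.length - i ≤ n →
    get_shifts_outer schedule shifts i = shifts ++ groupRuns (schedule.drop i) := by
  induction n with
  | zero =>
    intro schedule shifts i hle
    rw [get_shifts_outer, dif_neg (by omega)]
    rw [List.drop_of_length_le (by omega)]
    simp [groupRuns_nil]
  | succ n ih =>
    intro schedule shifts i hle
    by_cases hi : i < schedule.length
    · obtain ⟨x, rest, hx⟩ : ∃ x rest, schedule.drop i = x :: rest := by
        cases h : schedule.drop i with
        | nil => exfalso; have := List.length_drop (l := schedule) (i := i); rw [h] at this; simp at this; omega
        | cons a b => exact ⟨a, b, rfl⟩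
      have hsched : schedule = schedule.take i ++ x :: rest := by
        rw [← hx, List.take_append_drop]
      have htl : (schedule.take i).length = i := by
        rw [List.length_take]; omega
      have hre : get_shifts_runEnd schedule (i + 1) = i + 1 + chainLen x rest := by
        have h := runEnd_spec x rest (schedule.take i)
        rw [htl] at h
        rw [← hsched] at h
        exact h
      rw [get_shifts_outer, dif_pos hi]
      simp only []
      rw [hre]
      have hslice : PySem.List.slice schedule (some (i : Int)) (some ((i + 1 + chainLen x rest : Nat) : Int))
          = x :: rest.take (chainLen x rest) := by
        rw [PySem.List.slice_toNat]
        · simp only [Int.toNat_natCast, hx]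
          have : (i + 1 + chainLen x rest) - i = chainLen x rest + 1 := by omega
          rw [this, List.take_succ_cons]
        · positivity
        · positivity
      rw [hslice]
      have hdrop : schedule.drop (i + 1 + chainLen x rest) = rest.drop (chainLen x rest) := by
        have harith : i + 1 + chainLen x rest = i + (chainLen x rest + 1) := by omega
        rw [harith, ← List.drop_drop, hx, List.drop_succ_cons]
      have hrest : rest.length = schedule.length - i - 1 := by
        have := congrArg List.length hsched
        simp at this; omega
      rw [ih schedule _ (i + 1 + chainLen x rest) (by omega)]
      rw [hdrop, hx, groupRuns_cons]
      simp
    · rw [get_shifts_outer, dif_neg hi]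
      rw [List.drop_of_length_le (by omega)]
      simp [groupRuns_nil]

-- ===== VERDICT (by name: the statement is the Claim_ definition above) =====
theorem get_shifts_spec : Claim_equal_get_shifts := by
  intro schedule _
  unfold Spec_get_shifts
  rw [getShifts_eq_foldr, foldr_stepC_eq_groupRuns]
  unfold get_shifts_alt
  rw [outer_eq_groupRuns schedule.length schedule [] 0 (by omega)]
  simp
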